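-- pv_equiv track=rewrite | github.com/chandramohantn/twitter_learning | generator/knowledge_links.py | compute_related_posts
-- ===== SOURCE A (Python) =====
-- from collections import defaultdict
--
-- def compute_related_posts(posts, concept_index):
--     related_map = defaultdict(set)
--     for concept, files in concept_index.items():
--         for f1 in files:
--             for f2 in files:
--                 if f1 != f2:
--                     related_map[f1].add(f2)
--
--     return related_map
-- ===== SOURCE B (Python) =====
-- from collections import defaultdict
--
-- def compute_related_posts(posts, concept_index):
--     # Phase 1: inverted index file -> list of the concept groups it appears in,
--     # keeping only groups with more than one distinct file (others yield no pairs).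
--     file_groups = {}
--     for files in concept_index.values():
--         if len(set(files)) > 1:
--             for f in dict.fromkeys(files):
--                 file_groups.setdefault(f, []).append(files)
--     # Phase 2: each file's related set is the union of its groups, minus itself.
--     related_map = defaultdict(set)
--     for f, groups in file_groups.items():
--         rel = set()
--         for g in groups:
--             rel.update(g)
--         rel.discard(f)
--         related_map[f] = rel
--     return related_map
-- ===== Notes on version B (the rewrite author's own statement) =====
-- stated objective: alternative
-- what changed: A does one triple-nested loop adding files pair by pair; B is a two-phase algorithm: it first builds an inverted index mapping each file to the list of concept groups it appears in (keeping only groups with more than one distinct file), then computes each file's related set in one shot as the union of its groups minus the file itself.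
import Mathlib
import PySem

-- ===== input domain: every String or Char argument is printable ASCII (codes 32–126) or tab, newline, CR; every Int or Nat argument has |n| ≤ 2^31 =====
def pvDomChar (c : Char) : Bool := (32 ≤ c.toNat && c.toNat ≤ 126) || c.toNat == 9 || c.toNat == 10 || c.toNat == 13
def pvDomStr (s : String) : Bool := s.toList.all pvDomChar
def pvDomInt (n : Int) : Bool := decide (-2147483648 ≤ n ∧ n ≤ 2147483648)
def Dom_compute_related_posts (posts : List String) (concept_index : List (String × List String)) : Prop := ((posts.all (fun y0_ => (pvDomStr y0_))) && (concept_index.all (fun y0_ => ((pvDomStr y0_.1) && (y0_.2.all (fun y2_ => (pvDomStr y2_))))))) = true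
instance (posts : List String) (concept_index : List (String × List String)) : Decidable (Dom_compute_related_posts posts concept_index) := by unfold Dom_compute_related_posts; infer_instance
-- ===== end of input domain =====

-- B replaces A's triple-nested pair loop by a two-phase algorithm: first an inverted index
-- file -> its concept groups (keeping only groups with >1 distinct file), then one union per file.

-- ===== PORT A =====
-- A: for each concept, for each pair (f1, f2) of entries of its file list with f1 != f2,
--    related_map[f1].add(f2) on a defaultdict(set).
def compute_related_posts (posts : List String) (concept_index : List (String × List String)) : List (String × List String) :=
  (concept_index.foldl (fun related_map cf =>
      cf.2.foldl (fun related_map f1 =>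
        cf.2.foldl (fun related_map f2 =>
          if f1 ≠ f2 then related_map.modify f1 [] (fun s => PySem.Set.add s f2)
          else related_map) related_map) related_map)
    PySem.Dict.empty).items

-- ===== PORT B =====
-- B phase 1: inverted index file -> list of the concept groups it appears in, keeping only
--            groups with more than one distinct file (setdefault(f, []).append(files)).
-- B phase 2: for each indexed file, union its groups, discard the file itself, assign.
def compute_related_posts_alt (posts : List String) (concept_index : List (String × List String)) : List (String × List String) :=
  let file_groups : PySem.Dict String (List (List String)) :=
    concept_index.foldl (fun fg cf =>
      if 1 < (PySem.Set.ofList cf.2).length then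
        (PySem.List.dedup cf.2).foldl (fun fg f =>
          PySem.Dict.modify fg f [] (fun gs => gs ++ [cf.2])) fg
      else fg) PySem.Dict.empty
  (file_groups.items.foldl (fun related_map p =>
      PySem.Dict.insert related_map p.1
        (PySem.Set.discard (p.2.foldl (fun rel g => PySem.Set.update rel g) ([] : PySem.Set String)) p.1))
    PySem.Dict.empty).items

-- ===== PRECONDITION & SPEC =====
def Spec_compute_related_posts (posts : List String) (concept_index : List (String × List String)) (out : List (String × List String)) : Prop := out = compute_related_posts_alt posts concept_index
instance (posts : List String) (concept_index : List (String × List String)) (out : List (String × List String)) : Decidable (Spec_compute_related_posts posts concept_index out) := by unfold Spec_compute_related_posts; infer_instance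

-- ===== CLAIM (what is proved, stated in full; the proofs are below) =====
def Claim_equal_compute_related_posts : Prop := ∀ (posts : List String) (concept_index : List (String × List String)), Dom_compute_related_posts posts concept_index → Spec_compute_related_posts posts concept_index (compute_related_posts posts concept_index)

-- ===== LEMMAS AND PROOFS =====

-- ---------- Stage 1: A's pair loop equals a per-concept "clean" batch form ----------

-- Composing two modifies at the same key.
theorem pv_modify_modify_self {κ ν : Type} [BEq κ] [LawfulBEq κ] (d : PySem.Dict κ ν) (k : κ) (d0 : ν) (f g : ν → ν) :
    (PySem.Dict.modify (PySem.Dict.modify d k d0 f) k d0 g) = PySem.Dict.modify d k d0 (fun v => g (f v)) := by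
  simp [PySem.Dict.modify, PySem.Dict.getD_insert_self, PySem.Dict.insert_insert_self]

-- The inner f2-loop, started on a dict just modified at f1, keeps modifying f1.
theorem pv_inner_comp (f1 : String) (t : List String) :
    ∀ (g : List String → List String) (d : PySem.Dict String (List String)),
      t.foldl (fun rm f2 => PySem.Dict.modify rm f1 [] (fun s => PySem.Set.add s f2)) (PySem.Dict.modify d f1 [] g)
        = PySem.Dict.modify d f1 [] (fun s => t.foldl PySem.Set.add (g s)) := by
  induction t with
  | nil => intro g d; simp
  | cons b t ih =>
      intro g d
      simp only [List.foldl_cons]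
      rw [pv_modify_modify_self]
      rw [ih (fun s => PySem.Set.add (g s) b) d]

-- A nonempty run of single adds at key f1 is one batch update at f1.
theorem pv_inner_eq_update (f1 : String) (l : List String) (rm : PySem.Dict String (List String)) (h : l ≠ []) :
    l.foldl (fun rm f2 => PySem.Dict.modify rm f1 [] (fun s => PySem.Set.add s f2)) rm
      = PySem.Dict.modify rm f1 [] (fun s => PySem.Set.update s l) := by
  cases l with
  | nil => exact absurd rfl h
  | cons a t =>
      rw [List.foldl_cons]
      rw [pv_inner_comp f1 t (fun s => PySem.Set.add s a) rm]
      rfl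

-- update is idempotent.
theorem pv_update_idem (s : PySem.Set String) (xs : List String) :
    PySem.Set.update (PySem.Set.update s xs) xs = PySem.Set.update s xs := by
  conv_lhs => rw [PySem.Set.update_eq_append_filter]
  have hnil : (PySem.Set.ofList xs).filter (fun y => !(PySem.Set.update s xs).contains y) = [] := by
    rw [List.filter_eq_nil_iff]
    intro a ha
    have : a ∈ PySem.Set.update s xs :=
      (PySem.Set.mem_update s xs a).mpr (Or.inr ((PySem.Set.mem_ofList xs a).mp ha))
    simp [this]
  rw [hnil, List.append_nil]

-- update absorbs dedup of its argument.
theorem pv_update_ofList (s : PySem.Set String) (l : List String) :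
    PySem.Set.update s (PySem.Set.ofList l) = PySem.Set.update s l := by
  rw [PySem.Set.update_eq_append_filter, PySem.Set.update_eq_append_filter, PySem.Set.ofList_ofList]

-- filter commutes with Python's first-occurrence dedup.
theorem pv_ofList_filter (p : String → Bool) (xs : List String) :
    (PySem.Set.ofList xs).filter p = PySem.Set.ofList (xs.filter p) := by
  induction xs using List.reverseRecOn with
  | nil => simp [PySem.Set.ofList_nil]
  | append_singleton xs a ih =>
      by_cases hpa : p a = true
      · have hr : List.filter p (xs ++ [a]) = List.filter p xs ++ [a] := by
          simp [List.filter_append, hpa]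
        rw [PySem.Set.ofList_append_singleton, hr, PySem.Set.ofList_append_singleton]
        by_cases hax : a ∈ xs
        · rw [PySem.Set.add_of_mem ((PySem.Set.mem_ofList xs a).mpr hax)]
          rw [PySem.Set.add_of_mem ((PySem.Set.mem_ofList (xs.filter p) a).mpr
            (List.mem_filter.mpr ⟨hax, hpa⟩))]
          exact ih
        · rw [PySem.Set.add_of_not_mem (fun hc => hax ((PySem.Set.mem_ofList xs a).mp hc))]
          rw [PySem.Set.add_of_not_mem (fun hc => hax
            (List.mem_filter.mp ((PySem.Set.mem_ofList (xs.filter p) a).mp hc)).1)]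
          rw [List.filter_append]
          simp [hpa, ih]
      · have hr : List.filter p (xs ++ [a]) = List.filter p xs := by
          simp [List.filter_append, hpa]
        rw [PySem.Set.ofList_append_singleton, hr]
        by_cases hax : a ∈ xs
        · rw [PySem.Set.add_of_mem ((PySem.Set.mem_ofList xs a).mpr hax)]
          exact ih
        · rw [PySem.Set.add_of_not_mem (fun hc => hax ((PySem.Set.mem_ofList xs a).mp hc))]
          rw [List.filter_append]
          simp [hpa, ih]

-- dedup (x :: xs) peels x and removes all its later copies.
theorem pv_dedup_cons_filter (x : String) (xs : List String) :
    PySem.List.dedup (x :: xs) = x :: PySem.List.dedup (xs.filter (fun y => y ≠ x)) := by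
  rw [PySem.List.dedup_eq_ofList, PySem.List.dedup_eq_ofList, PySem.Set.ofList_cons]
  congr 1
  show List.filter (fun y => !(y == x)) (PySem.Set.ofList xs) = _
  have heq : (fun y : String => !(y == x)) = (fun y => decide (y ≠ x)) := by
    funext y; by_cases h : y = x <;> simp [h]
  rw [heq, pv_ofList_filter]

-- keys stay Nodup through modify (any value type).
theorem pv_nodup_keys_modify {ν : Type} (d : PySem.Dict String ν) (k : String) (d0 : ν)
    (f : ν → ν) (h : d.keys.Nodup) : (PySem.Dict.modify d k d0 f).keys.Nodup := by
  have := PySem.Dict.keys_modify d k d0 f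
  rw [this]
  exact PySem.Dict.nodup_keys_insert d k _ h

-- Re-inserting the stored value is a no-op (unique keys).
theorem pv_insert_get?_self (d : PySem.Dict String (List String)) (k : String) (v : List String)
    (hnd : d.keys.Nodup) (h : d.get? k = some v) : d.insert k v = d := by
  have hc : d.contains k = true := by rw [PySem.Dict.contains_eq_isSome_get?, h]; rfl
  apply PySem.Dict.ext
  rw [PySem.Dict.items_insert_of_contains d v hc]
  have hmap : ∀ p ∈ d.items, (if (p.1 == k) = true then (k, v) else p) = p := by
    intro p hp
    obtain ⟨p1, p2⟩ := p
    by_cases hpk : (p1 == k) = true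
    · have hk : p1 = k := eq_of_beq hpk
      subst hk
      have := PySem.Dict.get?_of_mem_items d hp hnd
      rw [h] at this
      have hv : v = p2 := Option.some.inj this
      simp [hv]
    · simp [hpk]
  rw [List.map_congr_left hmap]
  simp

-- The canonical per-file batch step, and its saturation invariant.
def pvStep (X : String → List String) (rm : PySem.Dict String (List String)) (f : String) : PySem.Dict String (List String) :=
  PySem.Dict.modify rm f [] (fun s => PySem.Set.update s (X f))

def pvSat (X : String → List String) (d : PySem.Dict String (List String)) (f : String) : Prop :=
  d.contains f = true ∧ PySem.Set.update (d.getD f []) (X f) = d.getD f []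

theorem pv_sat_step_self (X : String → List String) (d : PySem.Dict String (List String)) (f : String) :
    pvSat X (pvStep X d f) f := by
  constructor
  · unfold pvStep; rw [PySem.Dict.contains_modify]; simp
  · unfold pvStep; rw [PySem.Dict.getD_modify_self]; exact pv_update_idem _ _

theorem pv_sat_preserved (X : String → List String) (d : PySem.Dict String (List String)) (f g : String)
    (h : pvSat X d g) : pvSat X (pvStep X d f) g := by
  by_cases hfg : g = f
  · subst hfg
    constructor
    · unfold pvStep; rw [PySem.Dict.contains_modify]; simp
    · unfold pvStep; rw [PySem.Dict.getD_modify_self, h.2, h.2]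
  · constructor
    · unfold pvStep; rw [PySem.Dict.contains_modify, h.1]; simp
    · unfold pvStep; rw [PySem.Dict.getD_modify_of_ne d [] _ hfg]; exact h.2

theorem pv_sat_noop (X : String → List String) (d : PySem.Dict String (List String)) (f : String)
    (hnd : d.keys.Nodup) (h : pvSat X d f) : pvStep X d f = d := by
  obtain ⟨v, hv⟩ : ∃ v, d.get? f = some v := by
    have := h.1
    rw [PySem.Dict.contains_eq_isSome_get?] at this
    exact Option.isSome_iff_exists.mp this
  have hgd : d.getD f [] = v := by rw [PySem.Dict.getD_eq_get?_getD, hv]; rfl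
  show PySem.Dict.modify d f [] (fun s => PySem.Set.update s (X f)) = d
  rw [PySem.Dict.modify]
  have : PySem.Set.update (d.getD f []) (X f) = v := by rw [h.2, hgd]
  rw [this]
  exact pv_insert_get?_self d f v hnd hv

theorem pv_nodup_keys_step (X : String → List String) (d : PySem.Dict String (List String)) (f : String)
    (h : d.keys.Nodup) : (pvStep X d f).keys.Nodup := by
  unfold pvStep
  exact pv_nodup_keys_modify d f [] _ h

-- Once f is saturated, all later occurrences of f are no-ops.
theorem pv_foldl_step_skip (X : String → List String) (x : String) :
    ∀ (xs : List String) (d : PySem.Dict String (List String)), d.keys.Nodup → pvSat X d x →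
      xs.foldl (pvStep X) d = (xs.filter (fun y => y ≠ x)).foldl (pvStep X) d := by
  intro xs
  induction xs with
  | nil => intro d _ _; rfl
  | cons y ys ih =>
      intro d hnd hs
      by_cases hyx : y = x
      · have hf : List.filter (fun z => z ≠ x) (y :: ys) = List.filter (fun z => z ≠ x) ys := by
          simp [hyx]
        rw [hf, List.foldl_cons, hyx, pv_sat_noop X d x hnd hs]
        exact ih d hnd hs
      · have hf : List.filter (fun z => z ≠ x) (y :: ys) = y :: List.filter (fun z => z ≠ x) ys := by
          simp [hyx]
        rw [hf, List.foldl_cons, List.foldl_cons]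
        exact ih (pvStep X d y) (pv_nodup_keys_step X d y hnd) (pv_sat_preserved X d y x hs)

-- Folding the batch step over a list equals folding it over the deduplicated list.
theorem pv_foldl_step_dedup_aux (X : String → List String) :
    ∀ (n : Nat) (xs : List String), xs.length ≤ n → ∀ (d : PySem.Dict String (List String)), d.keys.Nodup →
      xs.foldl (pvStep X) d = (PySem.List.dedup xs).foldl (pvStep X) d := by
  intro n
  induction n with
  | zero =>
      intro xs h d _
      have : xs = [] := List.eq_nil_of_length_eq_zero (Nat.le_zero.mp h)
      subst this
      rw [PySem.List.dedup_eq_ofList, PySem.Set.ofList_nil]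
  | succ n ih =>
      intro xs h d hnd
      cases xs with
      | nil => rw [PySem.List.dedup_eq_ofList, PySem.Set.ofList_nil]
      | cons x t =>
          rw [pv_dedup_cons_filter, List.foldl_cons, List.foldl_cons]
          rw [pv_foldl_step_skip X x t (pvStep X d x) (pv_nodup_keys_step X d x hnd) (pv_sat_step_self X d x)]
          exact ih (t.filter (fun y => y ≠ x))
            (le_trans (List.length_filter_le _ t) (Nat.succ_le_succ_iff.mp h))
            (pvStep X d x) (pv_nodup_keys_step X d x hnd)

theorem pv_foldl_step_dedup (X : String → List String) (xs : List String)
    (d : PySem.Dict String (List String)) (hnd : d.keys.Nodup) :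
    xs.foldl (pvStep X) d = (PySem.List.dedup xs).foldl (pvStep X) d :=
  pv_foldl_step_dedup_aux X xs.length xs le_rfl d hnd

-- When at most one distinct file, all entries are equal.
theorem pv_all_eq_of_small (files : List String) (h : ¬ 1 < (PySem.List.dedup files).length) :
    ∀ a ∈ files, ∀ b ∈ files, a = b := by
  intro a ha b hb
  have ha' : a ∈ PySem.List.dedup files := (PySem.List.mem_dedup files a).mpr ha
  have hb' : b ∈ PySem.List.dedup files := (PySem.List.mem_dedup files b).mpr hb
  cases hd : PySem.List.dedup files with
  | nil => rw [hd] at ha'; cases ha'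
  | cons y t =>
      cases t with
      | nil =>
          rw [hd] at ha' hb'
          have h1 : a = y := by simpa using ha'
          have h2 : b = y := by simpa using hb'
          exact h1.trans h2.symm
      | cons z u =>
          have : 1 < (PySem.List.dedup files).length := by
            rw [hd]; simp only [List.length_cons]; omega
          exact absurd this h

-- With two distinct files, every f1 has a partner ≠ f1.
theorem pv_partner_of_big (files : List String) (h : 1 < (PySem.List.dedup files).length) (f1 : String) :
    files.filter (fun x => decide (f1 ≠ x)) ≠ [] := by
  intro hnil
  rw [List.filter_eq_nil_iff] at hnil
  cases hd : PySem.List.dedup files with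
  | nil => rw [hd] at h; simp at h
  | cons y t =>
      cases t with
      | nil => rw [hd] at h; simp at h
      | cons z u =>
          have hnd := PySem.List.nodup_dedup files
          rw [hd] at hnd
          have hyz : y ≠ z := by
            intro hc; rw [hc] at hnd; simp at hnd
          have hy : y ∈ files := (PySem.List.mem_dedup files y).mp (by rw [hd]; simp)
          have hz : z ∈ files := (PySem.List.mem_dedup files z).mp (by rw [hd]; simp)
          by_cases hyf : f1 = y
          · have := hnil z hz
            simp at this
            exact hyz (hyf.symm.trans this)
          · have := hnil y hy
            simp at this
            exact hyf this

-- The canonical per-concept batch step (A's clean form; dedup'd files, batch updates).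
def pvGStep (rm : PySem.Dict String (List String)) (g : List String) : PySem.Dict String (List String) :=
  (PySem.List.dedup g).foldl (fun rm f =>
    PySem.Dict.modify rm f [] (fun s =>
      PySem.Set.update s ((PySem.List.dedup g).filter (fun x => x ≠ f)))) rm

-- The per-concept step of A equals the clean batch step (when >1 distinct file) or a no-op.
theorem pv_concept_step_eq (files : List String) (rm : PySem.Dict String (List String)) (hnd : rm.keys.Nodup) :
    files.foldl (fun related_map f1 =>
        files.foldl (fun related_map f2 =>
          if f1 ≠ f2 then PySem.Dict.modify related_map f1 [] (fun s => PySem.Set.add s f2)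
          else related_map) related_map) rm
    = (if 1 < (PySem.List.dedup files).length then pvGStep rm files else rm) := by
  by_cases h : 1 < (PySem.List.dedup files).length
  · rw [if_pos h]
    have hA : files.foldl (fun related_map f1 =>
        files.foldl (fun related_map f2 =>
          if f1 ≠ f2 then PySem.Dict.modify related_map f1 [] (fun s => PySem.Set.add s f2)
          else related_map) related_map) rm
        = files.foldl (pvStep (fun f => (PySem.List.dedup files).filter (fun x => x ≠ f))) rm := by
      apply PySem.List.foldl_congr_mem
      intro acc f1 _
      rw [PySem.List.foldl_ite_eq_foldl_filter (fun f2 => f1 ≠ f2)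
        (fun rm f2 => PySem.Dict.modify rm f1 [] (fun s => PySem.Set.add s f2)) files acc]
      rw [pv_inner_eq_update f1 _ acc (pv_partner_of_big files h f1)]
      show PySem.Dict.modify acc f1 [] _ = PySem.Dict.modify acc f1 [] _
      congr 1
      funext s
      have h1 : PySem.Set.update s (files.filter (fun x => decide (f1 ≠ x)))
          = PySem.Set.update s ((PySem.List.dedup files).filter (fun x => decide (f1 ≠ x))) := by
        rw [← pv_update_ofList s (files.filter (fun x => decide (f1 ≠ x)))]
        rw [← pv_ofList_filter (fun x => decide (f1 ≠ x)) files]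
        rw [PySem.List.dedup_eq_ofList]
      rw [h1]
      congr 1
      apply List.filter_congr
      intro x _
      by_cases hx : x = f1
      · simp [hx]
      · simp only [decide_eq_decide]
        exact ⟨fun h' => fun hc => h' hc.symm, fun h' => fun hc => h' hc.symm⟩
    rw [hA]
    show _ = (PySem.List.dedup files).foldl (pvStep (fun f => (PySem.List.dedup files).filter (fun x => x ≠ f))) rm
    exact pv_foldl_step_dedup _ files rm hnd
  · rw [if_neg h]
    have hall := pv_all_eq_of_small files h
    have : files.foldl (fun related_map f1 =>
        files.foldl (fun related_map f2 =>
          if f1 ≠ f2 then PySem.Dict.modify related_map f1 [] (fun s => PySem.Set.add s f2)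
          else related_map) related_map) rm
        = files.foldl (fun acc _ => acc) rm := by
      apply PySem.List.foldl_congr_mem
      intro acc f1 hf1
      have hin : files.foldl (fun related_map f2 =>
          if f1 ≠ f2 then PySem.Dict.modify related_map f1 [] (fun s => PySem.Set.add s f2)
          else related_map) acc = files.foldl (fun acc _ => acc) acc := by
        apply PySem.List.foldl_congr_mem
        intro acc2 f2 hf2
        rw [if_neg]
        intro hne
        exact hne (hall f1 hf1 f2 hf2)
      rw [hin, PySem.List.foldl_ignore]
    rw [this, PySem.List.foldl_ignore]

-- Nodup keys through any modify-fold.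
theorem pv_nodup_keys_modify_fold {ν : Type} (d0 : ν) (F : String → ν → ν) :
    ∀ (l : List String) (d : PySem.Dict String ν), d.keys.Nodup →
      (l.foldl (fun d f => PySem.Dict.modify d f d0 (F f)) d).keys.Nodup := by
  intro l
  induction l with
  | nil => intro d h; exact h
  | cons x t ih => intro d h; exact ih _ (pv_nodup_keys_modify d x d0 (F x) h)

theorem pv_nodup_keys_gstep (g : List String) (rm : PySem.Dict String (List String))
    (h : rm.keys.Nodup) : (pvGStep rm g).keys.Nodup :=
  pv_nodup_keys_modify_fold [] _ (PySem.List.dedup g) rm h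

-- A's whole fold equals the guarded clean fold.
theorem pv_main_fold :
    ∀ (ci : List (String × List String)) (rm : PySem.Dict String (List String)), rm.keys.Nodup →
      ci.foldl (fun related_map cf =>
          cf.2.foldl (fun related_map f1 =>
            cf.2.foldl (fun related_map f2 =>
              if f1 ≠ f2 then PySem.Dict.modify related_map f1 [] (fun s => PySem.Set.add s f2)
              else related_map) related_map) related_map) rm
      = ci.foldl (fun related_map cf =>
          if 1 < (PySem.List.dedup cf.2).length then pvGStep related_map cf.2 else related_map) rm := by
  intro ci
  induction ci with
  | nil => intro rm _; rfl
  | cons cf t ih =>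
      intro rm hnd
      rw [List.foldl_cons, List.foldl_cons]
      rw [pv_concept_step_eq cf.2 rm hnd]
      apply ih
      by_cases h : 1 < (PySem.List.dedup cf.2).length
      · rw [if_pos h]; exact pv_nodup_keys_gstep cf.2 rm hnd
      · rw [if_neg h]; exact hnd

-- ---------- Stage 2: the clean fold equals B's two-phase computation ----------

-- B's phase-1 per-concept step: append the group to each distinct member's group list.
def pvFStep (fg : PySem.Dict String (List (List String))) (g : List String) : PySem.Dict String (List (List String)) :=
  (PySem.List.dedup g).foldl (fun fg f => PySem.Dict.modify fg f [] (fun gs => gs ++ [g])) fg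

-- B's phase-2 value: union of a file's groups, minus the file itself.
def pvRel (f : String) (groups : List (List String)) : PySem.Set String :=
  PySem.Set.discard (groups.foldl (fun rel g => PySem.Set.update rel g) ([] : PySem.Set String)) f

-- The multi-distinct concept groups, in order.
def pvGroups (ci : List (String × List String)) : List (List String) :=
  ci.filterMap (fun cf => if 1 < (PySem.List.dedup cf.2).length then some cf.2 else none)

-- A guarded fold is the fold over the selected groups.
theorem pv_foldl_guard {β : Type} (G : β → List String → β) :
    ∀ (ci : List (String × List String)) (init : β),
      ci.foldl (fun acc cf => if 1 < (PySem.List.dedup cf.2).length then G acc cf.2 else acc) init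
      = (pvGroups ci).foldl G init := by
  intro ci
  induction ci with
  | nil => intro init; rfl
  | cons cf t ih =>
      intro init
      rw [List.foldl_cons]
      by_cases h : 1 < (PySem.List.dedup cf.2).length
      · have : pvGroups (cf :: t) = cf.2 :: pvGroups t := by
          unfold pvGroups; rw [List.filterMap_cons, if_pos h]
        rw [this, if_pos h, List.foldl_cons]; exact ih _
      · have : pvGroups (cf :: t) = pvGroups t := by
          unfold pvGroups; rw [List.filterMap_cons, if_neg h]
        rw [this, if_neg h]; exact ih _

-- filter distributes over Set.add.
theorem pv_filter_add (p : String → Bool) (s : PySem.Set String) (x : String) :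
    (PySem.Set.add s x).filter p = if p x then PySem.Set.add (s.filter p) x else s.filter p := by
  by_cases hm : x ∈ s
  · rw [PySem.Set.add_of_mem hm]
    by_cases hp : p x = true
    · rw [if_pos hp, PySem.Set.add_of_mem (List.mem_filter.mpr ⟨hm, hp⟩)]
    · rw [if_neg hp]
  · rw [PySem.Set.add_of_not_mem hm]
    by_cases hp : p x = true
    · rw [if_pos hp, PySem.Set.add_of_not_mem (fun hc => hm (List.mem_filter.mp hc).1)]
      simp [List.filter_append, hp]
    · rw [if_neg hp]
      simp [List.filter_append, hp]

-- filter distributes over Set.update.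
theorem pv_filter_update (p : String → Bool) :
    ∀ (l : List String) (s : PySem.Set String),
      (PySem.Set.update s l).filter p = PySem.Set.update (s.filter p) (l.filter p) := by
  intro l
  induction l with
  | nil => intro s; rfl
  | cons x t ih =>
      intro s
      show (PySem.Set.update (PySem.Set.add s x) t).filter p = _
      rw [ih (PySem.Set.add s x), pv_filter_add]
      by_cases hp : p x = true
      · rw [if_pos hp]
        have : (x :: t).filter p = x :: t.filter p := by simp [hp]
        rw [this]
        rfl
      · rw [if_neg hp]
        have : (x :: t).filter p = t.filter p := by simp [hp]
        rw [this]

-- The two filter predicates "≠ f" coincide.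
theorem pv_pred_ne (f : String) :
    (fun y : String => !(y == f)) = (fun y : String => decide (y ≠ f)) := by
  funext y; by_cases h : y = f <;> simp [h]

-- Appending one group to a file's group list updates its related set by that group's
-- deduplicated members other than the file.
theorem pv_rel_append (f : String) (groups : List (List String)) (g : List String) :
    pvRel f (groups ++ [g])
      = PySem.Set.update (pvRel f groups) ((PySem.List.dedup g).filter (fun x => x ≠ f)) := by
  unfold pvRel
  rw [List.foldl_append, List.foldl_cons, List.foldl_nil]
  show (PySem.Set.update _ g).filter (fun y => !(y == f)) = PySem.Set.update (PySem.Set.discard _ f) _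
  rw [pv_filter_update]
  show PySem.Set.update (PySem.Set.discard _ f) (g.filter (fun y => !(y == f))) = _
  rw [pv_pred_ne]
  rw [← pv_update_ofList _ (g.filter (fun y => decide (y ≠ f)))]
  rw [← pv_ofList_filter (fun y => decide (y ≠ f)) g]
  rw [PySem.List.dedup_eq_ofList]

-- Items of a modify-fold over a duplicate-free key list: update present keys in place,
-- append the missing ones.
theorem pv_items_modify_fold {ν : Type} (d0 : ν) (F : String → ν → ν) :
    ∀ (l : List String), l.Nodup → ∀ (d : PySem.Dict String ν), d.keys.Nodup →
      (l.foldl (fun d f => PySem.Dict.modify d f d0 (F f)) d).items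
      = d.items.map (fun p => if p.1 ∈ l then (p.1, F p.1 p.2) else p)
        ++ (l.filter (fun f => !(d.contains f))).map (fun f => (f, F f d0)) := by
  intro l
  induction l with
  | nil =>
      intro _ d _
      simp
  | cons f t ih =>
      intro hnd d hd
      have hft : f ∉ t := (List.nodup_cons.mp hnd).1
      have htnd : t.Nodup := (List.nodup_cons.mp hnd).2
      rw [List.foldl_cons]
      have hd' : (PySem.Dict.modify d f d0 (F f)).keys.Nodup := pv_nodup_keys_modify d f d0 (F f) hd
      rw [ih htnd _ hd']
      have hcont : ∀ x ∈ t, (PySem.Dict.modify d f d0 (F f)).contains x = d.contains x := by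
        intro x hx
        rw [PySem.Dict.contains_modify]
        have : (x == f) = false := by
          simp only [beq_eq_false_iff_ne]
          intro hc; exact hft (hc ▸ hx)
        rw [this, Bool.false_or]
      have hfilter : t.filter (fun x => !((PySem.Dict.modify d f d0 (F f)).contains x))
          = t.filter (fun x => !(d.contains x)) := by
        apply List.filter_congr
        intro x hx
        rw [hcont x hx]
      rw [hfilter]
      by_cases hc : d.contains f = true
      · -- f already present: its entry is updated in place
        have hitems : (PySem.Dict.modify d f d0 (F f)).items
            = d.items.map (fun p => if (p.1 == f) = true then (f, F f (d.getD f d0)) else p) := by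
          show (d.insert f (F f (d.getD f d0))).items = _
          exact PySem.Dict.items_insert_of_contains d _ hc
        rw [hitems, List.map_map]
        have hmapeq : ∀ p ∈ d.items,
            ((fun p => if p.1 ∈ t then (p.1, F p.1 p.2) else p) ∘
              (fun p => if (p.1 == f) = true then (f, F f (d.getD f d0)) else p)) p
            = (fun p => if p.1 ∈ f :: t then (p.1, F p.1 p.2) else p) p := by
          intro p hp
          dsimp only [Function.comp]
          by_cases hpf : p.1 = f
          · have hb : (p.1 == f) = true := by simp [hpf]
            have hq : (if (p.1 == f) = true then (f, F f (d.getD f d0)) else p)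
                = (f, F f (d.getD f d0)) := if_pos hb
            simp only [hq]
            have hgd : d.getD f d0 = p.2 := by
              have h2 : (p.1, p.2) ∈ d.items := hp
              rw [hpf] at h2
              exact PySem.Dict.getD_of_mem_items d h2 hd d0
            have hmem : p.1 ∈ f :: t := by rw [hpf]; exact List.mem_cons_self
            rw [if_neg hft, if_pos hmem, hgd, hpf]
          · have hb : ¬ ((p.1 == f) = true) := by simp [hpf]
            have hq : (if (p.1 == f) = true then (f, F f (d.getD f d0)) else p) = p := if_neg hb
            simp only [hq]
            by_cases hpt : p.1 ∈ t
            · rw [if_pos hpt, if_pos (List.mem_cons_of_mem f hpt)]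
            · have hnm : p.1 ∉ f :: t := by
                intro hm
                rcases List.mem_cons.mp hm with h1 | h2
                · exact hpf h1
                · exact hpt h2
              rw [if_neg hpt, if_neg hnm]
        rw [List.map_congr_left hmapeq]
        have hffil : (f :: t).filter (fun x => !(d.contains x)) = t.filter (fun x => !(d.contains x)) := by
          simp [hc]
        rw [hffil]
      · -- f fresh: its entry is appended
        have hcf : d.contains f = false := by
          cases h' : d.contains f
          · rfl
          · exact absurd h' hc
        have hitems : (PySem.Dict.modify d f d0 (F f)).items = d.items ++ [(f, F f d0)] := by
          show (d.insert f (F f (d.getD f d0))).items = _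
          rw [PySem.Dict.getD_of_not_contains d d0 hcf]
          exact PySem.Dict.items_insert_of_not_contains d _ hcf
        rw [hitems, List.map_append]
        have hsingle : ([(f, F f d0)].map (fun p => if p.1 ∈ t then (p.1, F p.1 p.2) else p))
            = [(f, F f d0)] := by
          simp [hft]
        rw [hsingle]
        have hmapeq : ∀ p ∈ d.items,
            (fun p => if p.1 ∈ t then (p.1, F p.1 p.2) else p) p
            = (fun p => if p.1 ∈ f :: t then (p.1, F p.1 p.2) else p) p := by
          intro p hp
          dsimp only
          have hpf : p.1 ≠ f := by
            intro hc'
            have hk : p.1 ∈ d.keys := PySem.Dict.mem_keys_of_mem_items d hp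
            have hcd : d.contains f = true := by
              rw [PySem.Dict.contains_eq_decide_mem_keys]
              simp [hc' ▸ hk]
            rw [hcd] at hcf; cases hcf
          by_cases hpt : p.1 ∈ t
          · rw [if_pos hpt, if_pos (List.mem_cons_of_mem f hpt)]
          · have hnm : p.1 ∉ f :: t := by
              intro hm
              rcases List.mem_cons.mp hm with h1 | h2
              · exact hpf h1
              · exact hpt h2
            rw [if_neg hpt, if_neg hnm]
        rw [List.map_congr_left hmapeq]
        have hffil : (f :: t).filter (fun x => !(d.contains x))
            = f :: t.filter (fun x => !(d.contains x)) := by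
          simp [hcf]
        rw [hffil, List.map_cons, List.append_assoc]
        rfl

-- nodup keys of the clean fold and of the phase-1 fold.
theorem pv_nodup_keys_gfold (gs : List (List String)) :
    (gs.foldl pvGStep PySem.Dict.empty).keys.Nodup := by
  induction gs using List.reverseRecOn with
  | nil => exact PySem.Dict.nodup_keys_empty
  | append_singleton gs' g' ih =>
      rw [List.foldl_append, List.foldl_cons, List.foldl_nil]
      exact pv_nodup_keys_gstep g' _ ih

theorem pv_nodup_keys_phase1 (gs : List (List String)) :
    (gs.foldl pvFStep PySem.Dict.empty).keys.Nodup := by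
  induction gs using List.reverseRecOn with
  | nil => exact PySem.Dict.nodup_keys_empty
  | append_singleton gs' g' ih =>
      rw [List.foldl_append, List.foldl_cons, List.foldl_nil]
      exact pv_nodup_keys_modify_fold [] _ (PySem.List.dedup g') _ ih

-- The central invariant: the clean dict's items are the inverted index's items with each
-- file's group list replaced by its related set.
theorem pv_inv (gs : List (List String)) :
    (gs.foldl pvGStep PySem.Dict.empty).items
      = (gs.foldl pvFStep PySem.Dict.empty).items.map (fun p => (p.1, pvRel p.1 p.2)) := by
  induction gs using List.reverseRecOn with
  | nil => rfl
  | append_singleton gs g ih =>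
      rw [List.foldl_append, List.foldl_append, List.foldl_cons, List.foldl_nil, List.foldl_cons, List.foldl_nil]
      have hndG : (gs.foldl pvGStep PySem.Dict.empty).keys.Nodup := pv_nodup_keys_gfold gs
      have hndF : (gs.foldl pvFStep PySem.Dict.empty).keys.Nodup := pv_nodup_keys_phase1 gs
      set dG := gs.foldl pvGStep PySem.Dict.empty with hdG
      set dF := gs.foldl pvFStep PySem.Dict.empty with hdF
      have hGitems : (pvGStep dG g).items
          = dG.items.map (fun p => if p.1 ∈ PySem.List.dedup g
              then (p.1, PySem.Set.update p.2 ((PySem.List.dedup g).filter (fun x => x ≠ p.1))) else p)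
            ++ ((PySem.List.dedup g).filter (fun f => !(dG.contains f))).map
                (fun f => (f, PySem.Set.update ([] : PySem.Set String) ((PySem.List.dedup g).filter (fun x => x ≠ f)))) :=
        pv_items_modify_fold [] _ (PySem.List.dedup g) (PySem.List.nodup_dedup g) dG hndG
      have hFitems : (pvFStep dF g).items
          = dF.items.map (fun p => if p.1 ∈ PySem.List.dedup g then (p.1, p.2 ++ [g]) else p)
            ++ ((PySem.List.dedup g).filter (fun f => !(dF.contains f))).map
                (fun f => (f, ([] : List (List String)) ++ [g])) :=
        pv_items_modify_fold [] _ (PySem.List.dedup g) (PySem.List.nodup_dedup g) dF hndF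
      rw [hGitems, hFitems, List.map_append, List.map_map, List.map_map]
      -- keys (hence contains) of dG and dF coincide
      have hkeys : dG.keys = dF.keys := by
        show dG.items.map Prod.fst = dF.items.map Prod.fst
        rw [ih, List.map_map]
        rfl
      have hcont : ∀ f, dG.contains f = dF.contains f := by
        intro f
        rw [PySem.Dict.contains_eq_decide_mem_keys, PySem.Dict.contains_eq_decide_mem_keys, hkeys]
      congr 1
      · -- existing entries
        rw [ih, List.map_map]
        apply List.map_congr_left
        intro p _
        simp only [Function.comp]
        by_cases hm : p.1 ∈ PySem.List.dedup g
        · rw [if_pos hm, if_pos hm]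
          show (p.1, PySem.Set.update (pvRel p.1 p.2) _) = (p.1, pvRel p.1 (p.2 ++ [g]))
          rw [pv_rel_append]
        · rw [if_neg hm, if_neg hm]
      · -- fresh entries
        have hfil : (PySem.List.dedup g).filter (fun f => !(dG.contains f))
            = (PySem.List.dedup g).filter (fun f => !(dF.contains f)) := by
          apply List.filter_congr
          intro x _
          rw [hcont x]
        rw [hfil]
        apply List.map_congr_left
        intro f _
        show ((f : String), PySem.Set.update ([] : PySem.Set String) ((PySem.List.dedup g).filter (fun x => x ≠ f)))
            = (f, pvRel f (([] : List (List String)) ++ [g]))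
        rw [pv_rel_append f [] g]
        rfl

-- Phase 2 of B just materialises (f, pvRel f groups) pairs in order.
theorem pv_phase2 (fg : PySem.Dict String (List (List String))) (hnd : fg.keys.Nodup) :
    (fg.items.foldl (fun related_map p =>
        PySem.Dict.insert related_map p.1
          (PySem.Set.discard (p.2.foldl (fun rel g => PySem.Set.update rel g) ([] : PySem.Set String)) p.1))
      PySem.Dict.empty).items
    = fg.items.map (fun p => (p.1, pvRel p.1 p.2)) := by
  have h := PySem.Dict.items_foldl_insert_fresh (l := fg.items) (k := Prod.fst)
    (v := fun p => pvRel p.1 p.2) (d := (PySem.Dict.empty : PySem.Dict String (PySem.Set String)))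
    (by intro a _; exact PySem.Dict.contains_empty _)
    (by simpa [PySem.Dict.keys] using hnd)
  simpa [pvRel] using h

-- B's phase-1 guard (len(set(files)) > 1) in dedup form.
theorem pv_phase1_guard (ci : List (String × List String)) :
    ci.foldl (fun fg cf =>
        if 1 < (PySem.Set.ofList cf.2).length then
          (PySem.List.dedup cf.2).foldl (fun fg f =>
            PySem.Dict.modify fg f [] (fun gs => gs ++ [cf.2])) fg
        else fg) PySem.Dict.empty
    = (pvGroups ci).foldl pvFStep PySem.Dict.empty := by
  have h : ci.foldl (fun fg cf =>
        if 1 < (PySem.Set.ofList cf.2).length then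
          (PySem.List.dedup cf.2).foldl (fun fg f =>
            PySem.Dict.modify fg f [] (fun gs => gs ++ [cf.2])) fg
        else fg) PySem.Dict.empty
      = ci.foldl (fun fg cf =>
        if 1 < (PySem.List.dedup cf.2).length then pvFStep fg cf.2 else fg) PySem.Dict.empty := by
    apply PySem.List.foldl_congr_mem
    intro acc cf _
    rw [PySem.List.dedup_eq_ofList]
    rfl
  rw [h]
  exact pv_foldl_guard pvFStep ci PySem.Dict.empty

-- ===== VERDICT (by name: the statement is the Claim_ definition above) =====
theorem compute_related_posts_spec : Claim_equal_compute_related_posts := by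
  intro posts concept_index _
  unfold Spec_compute_related_posts compute_related_posts compute_related_posts_alt
  rw [pv_main_fold concept_index PySem.Dict.empty PySem.Dict.nodup_keys_empty]
  rw [pv_foldl_guard pvGStep concept_index PySem.Dict.empty]
  rw [pv_inv (pvGroups concept_index)]
  rw [pv_phase1_guard concept_index]
  rw [pv_phase2 _ (pv_nodup_keys_phase1 (pvGroups concept_index))]
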